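-- pv_equiv track=rewrite | github.com/blzzua/codewars | 7-kyu/asterisk_it.py | asterisc_it
-- ===== SOURCE A (Python) =====
-- def asterisc_it(n):
--     if isinstance(n,list):
--         n = ''.join(map(str,n))
--     if isinstance(n,int):
--         n = str(n)
--     res = n[0]
--     for a,b in zip(n,n[1:]):
--         if a in '02468' and b in '02468':
--             res+="*"
--         res+=b
--     return res
-- ===== SOURCE B (Python) =====
-- def asterisc_it(n):
--     if isinstance(n, list):
--         n = ''.join(map(str, n))
--     if isinstance(n, int):
--         n = str(n)
--     # stage 1: split into maximal runs of same evenness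
--     runs = []
--     for c in n:
--         ev = c in '02468'
--         if runs and runs[-1][0] == ev:
--             runs[-1][1].append(c)
--         else:
--             runs.append((ev, [c]))
--     # stage 2: even runs get their characters joined with '*'
--     return ''.join('*'.join(r) if ev else ''.join(r) for ev, r in runs)
-- ===== Notes on version B (the rewrite author's own statement) =====
-- stated objective: alternative
-- what changed: Replaces A's single-pass adjacent-pair scan with a two-stage algorithm: first group the string into maximal runs of equal evenness, then render each even-digit run by joining its characters with asterisks.
import Mathlib
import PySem

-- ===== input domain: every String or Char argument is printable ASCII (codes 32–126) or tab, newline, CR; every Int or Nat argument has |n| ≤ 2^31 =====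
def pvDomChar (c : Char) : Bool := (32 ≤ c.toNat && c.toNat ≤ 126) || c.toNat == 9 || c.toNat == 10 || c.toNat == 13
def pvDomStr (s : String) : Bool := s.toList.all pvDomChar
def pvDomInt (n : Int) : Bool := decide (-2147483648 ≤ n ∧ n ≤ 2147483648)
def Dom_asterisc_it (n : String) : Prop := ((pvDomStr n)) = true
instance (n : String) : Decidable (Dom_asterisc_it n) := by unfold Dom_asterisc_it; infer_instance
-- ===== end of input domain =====

-- B replaces A's adjacent-pair scan by a two-stage algorithm: group the string into maximal runs
-- of equal evenness, then join even runs with asterisks (alternative decomposition; return value only;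
-- the list/int coercion branches are outside the String signature).

-- ===== PORT A =====
-- 'a in "02468"' on a single character is membership in its characters (exact for 1-char strings)
def pvEven (c : Char) : Bool := ['0', '2', '4', '6', '8'].contains c

def asterisc_it (n : String) : String :=
  let cs := n.toList
  -- res = n[0]; Pre_ excludes the empty string, where Python raises IndexError
  let res : List Char := [PySem.List.pyGetD cs 0 ' ']
  let res := (cs.zip (PySem.List.slice cs (some 1) none)).foldl
    (fun acc ab =>
      let acc := if pvEven ab.1 && pvEven ab.2 then acc ++ ['*'] else acc
      acc ++ [ab.2]) res
  String.ofList res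

-- ===== PORT B =====
-- one step of B's grouping loop: extend runs[-1] if same evenness, else start a new run
def pvStep (runs : List (Bool × List Char)) (c : Char) : List (Bool × List Char) :=
  match runs.getLast? with
  | some last =>
      if last.1 == pvEven c then runs.dropLast ++ [(last.1, last.2 ++ [c])]
      else runs ++ [(pvEven c, [c])]
  | none => runs ++ [(pvEven c, [c])]

-- ''.join('*'.join(r) if ev else ''.join(r) for ev, r in runs)
def pvRender (runs : List (Bool × List Char)) : List Char :=
  runs.flatMap (fun p => if p.1 then List.intersperse '*' p.2 else p.2)

def asterisc_it_alt (n : String) : String :=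
  let cs := n.toList
  let runs := cs.foldl pvStep []
  String.ofList (pvRender runs)

-- ===== PRECONDITION & SPEC =====
-- A evaluates n[0], which raises IndexError on the empty string; Pre_ excludes exactly that input.
def Pre_asterisc_it (n : String) : Prop := n ≠ ""
instance (n : String) : Decidable (Pre_asterisc_it n) := by unfold Pre_asterisc_it; infer_instance
def pvWitness_asterisc_it : String := "2483"

def Spec_asterisc_it (n : String) (out : String) : Prop := out = asterisc_it_alt n
instance (n : String) (out : String) : Decidable (Spec_asterisc_it n out) := by unfold Spec_asterisc_it; infer_instance

-- ===== CLAIM (what is proved, stated in full; the proofs are below) =====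
def Claim_equal_asterisc_it : Prop := ∀ (n : String), Dom_asterisc_it n → Pre_asterisc_it n → Spec_asterisc_it n (asterisc_it n)

-- ===== LEMMAS AND PROOFS =====

-- canonical left-to-right form of the star insertion (A's result is reduced to this)
def pvGo : List Char → List Char
  | [] => []
  | [c] => [c]
  | c :: d :: t => (if pvEven c && pvEven d then [c, '*'] else [c]) ++ pvGo (d :: t)

lemma pvA_fold (t : List Char) : ∀ (b : Char) (acc : List Char),
    ((b :: t).zip t).foldl
      (fun acc ab =>
        (if pvEven ab.1 && pvEven ab.2 then acc ++ ['*'] else acc) ++ [ab.2]) (acc ++ [b])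
      = acc ++ pvGo (b :: t) := by
  induction t with
  | nil => intro b acc; simp [pvGo]
  | cons c t ih =>
    intro b acc
    simp only [List.zip_cons_cons, List.foldl_cons]
    by_cases h : (pvEven b && pvEven c) = true
    · have := ih c (acc ++ [b, '*'])
      simp [h, pvGo] at this ⊢
      simpa using this
    · have := ih c (acc ++ [b])
      simp [h, pvGo] at this ⊢
      simpa using this

lemma pvGo_snoc : ∀ (p : List Char) (a b : Char),
    pvGo ((p ++ [a]) ++ [b]) = pvGo (p ++ [a]) ++ (if pvEven a && pvEven b then ['*', b] else [b]) := by
  intro p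
  induction p with
  | nil => intro a b; by_cases h : (pvEven a && pvEven b) = true <;> simp [pvGo, h]
  | cons c p ih =>
    intro a b
    cases p with
    | nil =>
      by_cases h1 : (pvEven c && pvEven a) = true <;>
        by_cases h2 : (pvEven a && pvEven b) = true <;> simp [pvGo, h1, h2]
    | cons d t =>
      have h := ih a b
      simp only [List.cons_append, pvGo] at h ⊢
      rw [h]
      by_cases h1 : (pvEven c && pvEven d) = true <;> simp [h1]

lemma intersperse_snoc (s : List Char) (b : Char) (h : s ≠ []) :
    List.intersperse '*' (s ++ [b]) = List.intersperse '*' s ++ ['*', b] := by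
  induction s with
  | nil => exact absurd rfl h
  | cons x s ih =>
    cases s with
    | nil => simp [List.intersperse]
    | cons y t =>
      have := ih (by simp)
      simp only [List.cons_append, List.intersperse] at this ⊢
      rw [this]

lemma pvRender_append (rs : List (Bool × List Char)) (run : Bool × List Char) :
    pvRender (rs ++ [run]) = pvRender rs ++ (if run.1 then List.intersperse '*' run.2 else run.2) := by
  simp [pvRender]

-- loop invariant of B's grouping fold: after a nonempty prefix p ++ [b], the run list ends in the
-- run containing b (with b's evenness), and rendering it yields the canonical star insertion.
lemma pvRuns_inv : ∀ (p : List Char) (b : Char),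
    (∃ rs r, (p ++ [b]).foldl pvStep [] = rs ++ [(pvEven b, r ++ [b])]) ∧
    pvRender ((p ++ [b]).foldl pvStep []) = pvGo (p ++ [b]) := by
  intro p
  induction p using List.reverseRecOn with
  | nil =>
    intro b
    refine ⟨⟨[], [], by simp [pvStep]⟩, ?_⟩
    by_cases h : pvEven b = true <;> simp [pvStep, pvRender, pvGo, h, List.intersperse]
  | append_singleton q a ih =>
    intro b
    obtain ⟨⟨rs, r, hruns⟩, hrender⟩ := ih a
    have hfold : ((q ++ [a]) ++ [b]).foldl pvStep [] = pvStep ((q ++ [a]).foldl pvStep []) b := by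
      rw [List.foldl_append]; rfl
    rw [hruns] at hfold hrender
    by_cases heq : pvEven a = pvEven b
    · have hstep : pvStep (rs ++ [(pvEven a, r ++ [a])]) b
          = rs ++ [(pvEven b, (r ++ [a]) ++ [b])] := by
        simp [pvStep, heq]
      rw [hstep] at hfold
      refine ⟨⟨rs, r ++ [a], hfold⟩, ?_⟩
      rw [hfold, pvRender_append, pvGo_snoc]
      rw [pvRender_append] at hrender
      by_cases hb : pvEven b = true
      · have ha : pvEven a = true := heq ▸ hb
        simp only [ha, hb, Bool.and_self, if_true] at hrender ⊢
        rw [intersperse_snoc (r ++ [a]) b (by simp), ← List.append_assoc, hrender]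
      · have ha : pvEven a = false := by rw [heq]; simpa using hb
        simp only [ha, hb, Bool.and_false] at hrender ⊢
        simp only [Bool.false_eq_true, if_false] at hrender ⊢
        rw [← List.append_assoc, hrender]
    · have hstep : pvStep (rs ++ [(pvEven a, r ++ [a])]) b
          = (rs ++ [(pvEven a, r ++ [a])]) ++ [(pvEven b, [b])] := by
        simp [pvStep, heq]
      rw [hstep] at hfold
      refine ⟨⟨rs ++ [(pvEven a, r ++ [a])], [], by simpa using hfold⟩, ?_⟩
      rw [hfold, pvRender_append, pvGo_snoc, hrender]
      have hab : (pvEven a && pvEven b) = false := by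
        cases ha : pvEven a <;> cases hb : pvEven b <;> simp_all
      rw [hab]
      by_cases hb : pvEven b = true <;> simp [hb, List.intersperse]

-- ===== VERDICT (by name: the statement is the Claim_ definition above) =====
theorem asterisc_it_spec : Claim_equal_asterisc_it := by
  intro n _ hpre
  unfold Spec_asterisc_it asterisc_it asterisc_it_alt
  cases hcs : n.toList with
  | nil =>
    exact absurd (by simpa using congrArg String.ofList hcs) hpre
  | cons b t =>
    have hA := pvA_fold t b []
    simp only [List.nil_append] at hA
    simp only [PySem.List.slice_from_one, List.tail_cons, PySem.List.pyGetD_zero_cons]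
    rw [hA]
    obtain ⟨q, c, hqc⟩ : ∃ q c, b :: t = q ++ [c] := by
      rcases (b :: t).eq_nil_or_concat with h | ⟨q, c, h⟩
      · simp at h
      · exact ⟨q, c, by simpa using h⟩
    rw [hqc]
    exact congrArg String.ofList ((pvRuns_inv q c).2).symm
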